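-- pv_equiv track=rewrite | github.com/jee-woo/problem-solving-auto | 프로그래머스/3/12938. 최고의 집합/최고의 집합.py | solution
-- ===== SOURCE A (Python) =====
-- def solution(n, s):
--     answer = []
--     if n > s:
--         return [-1]
--
--     share = s // n
--     remain = s % n
--
--     for i in range(n):
--         answer.append(share)
--
--     for i in range(remain):
--         answer[n-i-1] += 1
--
--     return answer
-- ===== SOURCE B (Python) =====
-- def solution(n, s):
--     if n > s:
--         return [-1]
--     answer = []
--     while n > 0:
--         q = s // n
--         answer.append(q)
--         s -= q
--         n -= 1
--     return answer
-- ===== Notes on version B (the rewrite author's own statement) =====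
-- stated objective: alternative
-- what changed: Replaces A's two staged passes (fill n copies of s//n, then increment the last s%n slots in place) with a single greedy pass that repeatedly emits s//n and shrinks the remaining sum and count, so the remainder is distributed implicitly by the floor division itself.
import Mathlib
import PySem

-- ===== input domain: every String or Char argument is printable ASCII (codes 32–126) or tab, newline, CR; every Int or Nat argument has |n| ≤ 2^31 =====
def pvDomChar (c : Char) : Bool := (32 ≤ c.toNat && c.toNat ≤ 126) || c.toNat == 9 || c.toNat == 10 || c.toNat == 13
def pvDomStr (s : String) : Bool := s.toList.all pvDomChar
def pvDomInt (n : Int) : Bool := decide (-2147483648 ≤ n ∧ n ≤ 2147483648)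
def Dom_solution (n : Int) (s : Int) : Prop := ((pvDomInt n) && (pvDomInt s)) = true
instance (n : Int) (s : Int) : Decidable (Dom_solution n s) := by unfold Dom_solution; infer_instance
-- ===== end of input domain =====

-- B replaces A's two staged passes (fill, then bump the last s%n slots) by one greedy
-- pass repeatedly emitting s//n and shrinking s and n; return values agree on all of Pre_.

-- ===== PORT A =====
def solution (n : Int) (s : Int) : List Int :=
  if n > s then [-1]
  else
    let share := PySem.Int.floordiv s n
    let remain := PySem.Int.mod s n
    let answer := (PySem.List.pyRange 0 n 1).foldl (fun acc _ => acc ++ [share]) []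
    -- answer[n-i-1] += 1 : on every input admitted by Pre_ the index n-i-1 lies in
    -- [0, len(answer)), so Python's item assignment is exactly List.modify at that index
    (PySem.List.pyRange 0 remain 1).foldl
      (fun acc i => acc.modify (n - i - 1).toNat (· + 1)) answer

-- ===== PORT B =====
-- the while-loop of Source B: while n > 0: q = s // n; append q; s -= q; n -= 1
def solutionAltGo (n : Int) (s : Int) : List Int :=
  if _h : n > 0 then
    PySem.Int.floordiv s n :: solutionAltGo (n - 1) (s - PySem.Int.floordiv s n)
  else []
termination_by n.toNat
decreasing_by omega

def solution_alt (n : Int) (s : Int) : List Int :=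
  if n > s then [-1] else solutionAltGo n s

-- ===== PRECONDITION & SPEC =====
-- Pre_ excludes exactly n = 0 with s ≥ 0, where A raises ZeroDivisionError on s // n.
def Pre_solution (n : Int) (s : Int) : Prop := n = 0 → s < 0
instance (n : Int) (s : Int) : Decidable (Pre_solution n s) := by unfold Pre_solution; infer_instance
def pvWitness_solution : Int × Int := (3, 14)

def Spec_solution (n : Int) (s : Int) (out : List Int) : Prop := out = solution_alt n s
instance (n : Int) (s : Int) (out : List Int) : Decidable (Spec_solution n s out) := by unfold Spec_solution; infer_instance

-- ===== CLAIM (what is proved, stated in full; the proofs are below) =====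
def Claim_equal_solution : Prop := ∀ (n : Int) (s : Int), Dom_solution n s → Pre_solution n s → Spec_solution n s (solution n s)

-- ===== LEMMAS AND PROOFS =====

-- A's first loop appends `share` once per iteration: it builds a replicate
theorem foldl_append_replicate (l : List Int) (x : Int) (a : List Int) :
    l.foldl (fun acc _ => acc ++ [x]) a = a ++ List.replicate l.length x := by
  induction l generalizing a with
  | nil => simp
  | cons h t ih => simp [List.foldl_cons, ih, List.replicate_succ]

-- modifying the last element of the first block
theorem modify_replicate_append (m : Nat) (x : Int) (t : List Int) :
    (List.replicate (m + 1) x ++ t).modify m (· + 1)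
      = List.replicate m x ++ ((x + 1) :: t) := by
  induction m with
  | zero => simp [List.modify]
  | succ k ih =>
      have : List.replicate (k + 1 + 1) x ++ t = x :: (List.replicate (k + 1) x ++ t) := by
        simp [List.replicate_succ]
      rw [this, List.modify_cons]
      simp only [Nat.succ_ne_zero, if_false, Nat.add_sub_cancel]
      rw [ih]
      simp [List.replicate_succ]

-- invariant of A's second loop: after r iterations the last r entries are share+1
theorem loop2_invariant (N : Nat) (x : Int) (r : Nat) (hr : r ≤ N) :
    (PySem.List.pyRange 0 (r : Int) 1).foldl
      (fun acc i => acc.modify ((N : Int) - i - 1).toNat (· + 1)) (List.replicate N x)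
    = List.replicate (N - r) x ++ List.replicate r (x + 1) := by
  induction r with
  | zero => simp
  | succ k ih =>
      have hk : k ≤ N := Nat.le_of_succ_le hr
      have hsplit : PySem.List.pyRange 0 ((k : Int) + 1) 1
          = PySem.List.pyRange 0 (k : Int) 1 ++ [(k : Int)] := by
        exact PySem.List.pyRange_one_succ_right (by omega)
      have hcast : ((k + 1 : Nat) : Int) = (k : Int) + 1 := by push_cast; ring
      rw [hcast, hsplit, List.foldl_append, ih hk]
      have hidx : ((N : Int) - (k : Int) - 1).toNat = N - k - 1 := by omega
      have hNk : N - k = (N - k - 1) + 1 := by omega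
      rw [List.foldl_cons, List.foldl_nil, hidx, hNk]
      simp only [Nat.add_sub_cancel]
      rw [modify_replicate_append]
      have : List.replicate (k + 1) (x + 1) = (x + 1) :: List.replicate k (x + 1) := rfl
      rw [this]
      have h2 : N - (k + 1) = N - k - 1 := by omega
      rw [h2]

theorem solutionAltGo_nonpos (n s : Int) (h : ¬ n > 0) : solutionAltGo n s = [] := by
  rw [solutionAltGo]; simp [h]

-- floor division of q*b + r by b, 0 ≤ r < b
theorem floordiv_mul_add (q b r : Int) (hb : 0 < b) (hr0 : 0 ≤ r) (hrb : r < b) :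
    PySem.Int.floordiv (q * b + r) b = q := by
  rw [PySem.Int.floordiv_eq_iff_of_pos hb]
  constructor
  · linarith
  · nlinarith

-- exact remainder: B's greedy loop emits q exactly N times
theorem solutionAltGo_exact (N : Nat) (q : Int) :
    solutionAltGo (N : Int) (q * (N : Int)) = List.replicate N q := by
  induction N generalizing q with
  | zero => simp [solutionAltGo_nonpos]
  | succ M ih =>
      rw [solutionAltGo]
      have hpos : ((M + 1 : Nat) : Int) > 0 := by push_cast; omega
      have hdiv : PySem.Int.floordiv (q * ((M + 1 : Nat) : Int)) ((M + 1 : Nat) : Int) = q := by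
        have := floordiv_mul_add q ((M + 1 : Nat) : Int) 0 hpos le_rfl hpos
        simpa using this
      simp only [hpos, dif_pos, hdiv]
      have h1 : ((M + 1 : Nat) : Int) - 1 = (M : Int) := by push_cast; ring
      have h2 : q * ((M + 1 : Nat) : Int) - q = q * (M : Int) := by push_cast; ring
      rw [h1, h2, ih, List.replicate_succ]

-- B's greedy loop on s = q*N + r (0 ≤ r < N) yields the two-block partition
theorem solutionAltGo_blocks (N : Nat) (q : Int) (r : Nat) (h : r < N) :
    solutionAltGo (N : Int) (q * (N : Int) + (r : Int))
      = List.replicate (N - r) q ++ List.replicate r (q + 1) := by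
  induction N generalizing q r with
  | zero => omega
  | succ M ih =>
      rw [solutionAltGo]
      have hpos : ((M + 1 : Nat) : Int) > 0 := by push_cast; omega
      have hdiv : PySem.Int.floordiv (q * ((M + 1 : Nat) : Int) + (r : Int))
          ((M + 1 : Nat) : Int) = q :=
        floordiv_mul_add q _ (r : Int) hpos (by omega) (by push_cast; omega)
      simp only [hpos, dif_pos, hdiv]
      have h1 : ((M + 1 : Nat) : Int) - 1 = (M : Int) := by push_cast; ring
      have h2 : q * ((M + 1 : Nat) : Int) + (r : Int) - q = q * (M : Int) + (r : Int) := by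
        push_cast; ring
      rw [h1, h2]
      by_cases hrM : r < M
      · rw [ih q r hrM]
        have : M + 1 - r = (M - r) + 1 := by omega
        rw [this, List.replicate_succ]; simp
      · -- r = M : the tail is exactly (q+1) * M
        have hrM' : r = M := by omega
        subst hrM'
        have h3 : q * (r : Int) + (r : Int) = (q + 1) * (r : Int) := by ring
        rw [h3, solutionAltGo_exact r (q + 1)]
        have : r + 1 - r = 1 := by omega
        rw [this]; simp [List.replicate_succ]

-- ===== VERDICT (by name: the statement is the Claim_ definition above) =====
theorem solution_spec : Claim_equal_solution := by
  intro n s _ hpre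
  unfold Spec_solution solution solution_alt
  by_cases hgt : n > s
  · simp [hgt]
  · simp only [hgt, if_false]
    by_cases hpos : 0 < n
    · set share := PySem.Int.floordiv s n with hshare
      set remain := PySem.Int.mod s n with hremain
      have hr0 : 0 ≤ remain := PySem.Int.mod_nonneg s hpos
      have hrn : remain < n := PySem.Int.mod_lt s hpos
      have hsum : share * n + remain = s := PySem.Int.floordiv_mul_add_mod s n
      obtain ⟨N, hN⟩ : ∃ N : Nat, n = (N : Int) := ⟨n.toNat, by omega⟩
      obtain ⟨r, hrr⟩ : ∃ r : Nat, remain = (r : Int) := ⟨remain.toNat, by omega⟩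
      have hlen : (PySem.List.pyRange 0 n 1).length = N := by
        rw [PySem.List.length_pyRange_one]; omega
      rw [foldl_append_replicate, hlen, List.nil_append, hN, hrr,
        loop2_invariant N share r (by omega)]
      have hs : s = share * (N : Int) + (r : Int) := by rw [← hN, ← hrr]; linarith [hsum]
      rw [hs, solutionAltGo_blocks N share r (by omega)]
    · -- n < 0 (n = 0 is excluded by Pre_ unless s < 0 < n impossible… n ≤ s < 0):
      have hn0 : n ≠ 0 := by
        intro h; have := hpre h; omega
      have hneg : n < 0 := by omega
      have hb := PySem.Int.mod_neg_bounds s hneg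
      rw [PySem.List.pyRange_one_eq_nil (by omega : n ≤ 0), List.foldl_nil,
        PySem.List.pyRange_one_eq_nil (by omega : PySem.Int.mod s n ≤ 0), List.foldl_nil,
        solutionAltGo_nonpos n s (by omega)]
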